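-- pv_equiv track=rewrite | github.com/Vedaang-Chopra/Collection_of_Machine_Learning_Projects | Supervised_Learning_Projects/CN_Naive_Bayes_Text_Classification_20_Newsgroups/temp_run.py | creating_dataset
-- ===== SOURCE A (Python) =====
-- def creating_dataset(vocab,output_labels,word_array,freq_array):
--     # main_content=[]
--     content=[[0 for j in range(len(vocab))] for i in range(len(output_labels))]
--     for i in range(len(word_array)):
--         for j in range(len((word_array[i]))):
--             for k in range(len(vocab)):
--                 if word_array[i][j]==vocab[k]:
--                     content[i][k]=freq_array[i][j]
--                 else:
--                     continue
--     return content
-- ===== SOURCE B (Python) =====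
-- def creating_dataset(vocab, output_labels, word_array, freq_array):
--     docs = [dict(zip(w, f)) for w, f in zip(word_array, freq_array)]
--     return [[docs[i].get(v, 0) if i < len(docs) else 0 for v in vocab]
--             for i in range(len(output_labels))]
-- ===== Notes on version B (the rewrite author's own statement) =====
-- stated objective: simpler
-- what changed: A's triple-nested loop (for every word of every document, scan the whole vocabulary and scatter-write into a preallocated matrix) is replaced by building one word->freq dict per document from zip(words, freqs) and then reading each output row directly off the vocabulary with dict.get.
import Mathlib
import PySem

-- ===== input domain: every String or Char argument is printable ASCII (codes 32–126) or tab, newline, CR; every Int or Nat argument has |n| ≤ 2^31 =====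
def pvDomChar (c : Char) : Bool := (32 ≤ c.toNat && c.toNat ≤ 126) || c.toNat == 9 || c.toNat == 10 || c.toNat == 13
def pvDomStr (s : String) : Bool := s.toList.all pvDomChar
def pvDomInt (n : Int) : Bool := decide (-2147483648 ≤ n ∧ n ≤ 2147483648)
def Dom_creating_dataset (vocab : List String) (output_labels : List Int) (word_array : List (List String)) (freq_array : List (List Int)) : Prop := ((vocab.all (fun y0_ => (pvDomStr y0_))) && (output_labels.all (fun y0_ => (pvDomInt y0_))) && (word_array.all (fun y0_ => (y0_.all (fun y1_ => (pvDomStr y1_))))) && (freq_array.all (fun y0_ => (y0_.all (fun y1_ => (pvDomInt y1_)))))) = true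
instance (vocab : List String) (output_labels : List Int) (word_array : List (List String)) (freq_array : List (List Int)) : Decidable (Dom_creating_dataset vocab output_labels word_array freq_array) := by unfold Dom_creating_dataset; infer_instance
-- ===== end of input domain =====

-- B replaces A's triple-nested scatter-write (for every word, scan the whole vocabulary and write into
-- content in place) by building one dict per document from zip(words, freqs) and then reading each row
-- off the vocabulary with dict.get — simpler, and no inner vocab scan per word.
-- A mutates only its local `content`; no argument is mutated, so return-value equivalence is the whole story.

-- ===== PORT A =====
-- Python indices i, j, k come from range() and index word_array / word_array[i] / vocab in range, so
-- getD is exact there; content[i] can be OUT of range in Python (IndexError) — those inputs are excluded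
-- by Pre_, and the port's List.set /getD-with-default are no-ops/defaults exactly there.
def creating_dataset (vocab : List String) (output_labels : List Int) (word_array : List (List String)) (freq_array : List (List Int)) : List (List Int) :=
  let content := (List.range output_labels.length).map (fun _ => (List.range vocab.length).map (fun _ => (0 : Int)))
  (List.range word_array.length).foldl (fun content i =>
    (List.range (word_array.getD i []).length).foldl (fun content j =>
      (List.range vocab.length).foldl (fun content k =>
        if (word_array.getD i []).getD j "" == vocab.getD k "" then
          content.set i ((content.getD i []).set k ((freq_array.getD i []).getD j 0))
        else content) content) content) content

-- ===== PORT B =====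
-- docs = [dict(zip(w, f)) for w, f in zip(word_array, freq_array)]
-- return [[docs[i].get(v, 0) if i < len(docs) else 0 for v in vocab] for i in range(len(output_labels))]
def creating_dataset_alt (vocab : List String) (output_labels : List Int) (word_array : List (List String)) (freq_array : List (List Int)) : List (List Int) :=
  let docs := (word_array.zip freq_array).map
    (fun wf => (wf.1.zip wf.2).foldl (fun d p => d.insert p.1 p.2) (PySem.Dict.empty : PySem.Dict String Int))
  (List.range output_labels.length).map (fun i =>
    vocab.map (fun v => if i < docs.length then (docs.getD i PySem.Dict.empty).getD v 0 else 0))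

-- ===== PRECONDITION & SPEC =====
-- Exactly the inputs on which Python A returns: A raises IndexError as soon as some word equal to a
-- vocabulary entry sits at row i ≥ len(output_labels) (content[i]), row i ≥ len(freq_array)
-- (freq_array[i]) or column j ≥ len(freq_array[i]) (freq_array[i][j]); nothing else is excluded.
def Pre_creating_dataset (vocab : List String) (output_labels : List Int) (word_array : List (List String)) (freq_array : List (List Int)) : Prop :=
  ∀ i < word_array.length, ∀ j < (word_array.getD i []).length,
    (word_array.getD i []).getD j "" ∈ vocab →
      i < output_labels.length ∧ i < freq_array.length ∧ j < (freq_array.getD i []).length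
instance (vocab : List String) (output_labels : List Int) (word_array : List (List String)) (freq_array : List (List Int)) : Decidable (Pre_creating_dataset vocab output_labels word_array freq_array) := by unfold Pre_creating_dataset; infer_instance

def pvWitness_creating_dataset : List String × List Int × List (List String) × List (List Int) :=
  (["cat", "dog"], [1, 0], [["dog", "cat"], ["dog"]], [[3, 5], [7]])

def Spec_creating_dataset (vocab : List String) (output_labels : List Int) (word_array : List (List String)) (freq_array : List (List Int)) (out : List (List Int)) : Prop := out = creating_dataset_alt vocab output_labels word_array freq_array
instance (vocab : List String) (output_labels : List Int) (word_array : List (List String)) (freq_array : List (List Int)) (out : List (List Int)) : Decidable (Spec_creating_dataset vocab output_labels word_array freq_array out) := by unfold Spec_creating_dataset; infer_instance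

-- ===== CLAIM (what is proved, stated in full; the proofs are below) =====
def Claim_equal_creating_dataset : Prop := ∀ (vocab : List String) (output_labels : List Int) (word_array : List (List String)) (freq_array : List (List Int)), Dom_creating_dataset vocab output_labels word_array freq_array → Pre_creating_dataset vocab output_labels word_array freq_array → Spec_creating_dataset vocab output_labels word_array freq_array (creating_dataset vocab output_labels word_array freq_array)

-- ===== LEMMAS AND PROOFS =====

-- writing back the row that is already there changes nothing
theorem pv_set_getD_self (c : List (List Int)) (i : Nat) : c.set i (c.getD i []) = c := by
  by_cases h : i < c.length
  · rw [List.getD_eq_getElem c [] h]; exact List.set_getElem_self h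
  · exact List.set_eq_of_length_le (by omega)

-- a fold whose every step only rewrites row i factors through that row
theorem pv_foldl_set_local (steps : List Nat) (upd : List Int → Nat → List Int) (i : Nat) :
    ∀ c : List (List Int),
      steps.foldl (fun c b => c.set i (upd (c.getD i []) b)) c
        = c.set i (steps.foldl upd (c.getD i [])) := by
  induction steps with
  | nil => intro c; simp only [List.foldl_nil]; exact (pv_set_getD_self c i).symm
  | cons b bs ih =>
    intro c
    simp only [List.foldl_cons]
    rw [ih]
    by_cases h : i < c.length
    · have h1 : (c.set i (upd (c.getD i []) b)).getD i [] = upd (c.getD i []) b := by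
        rw [List.getD_eq_getElem _ [] (by simpa using h)]
        simp [List.getElem_set_self, h]
      rw [h1, List.set_set]
    · have hc : ∀ x, c.set i x = c := fun x => List.set_eq_of_length_le (by omega)
      rw [hc, hc, hc]

-- the k-scan over the vocabulary, entry by entry
theorem pv_kfold_getElem (V : List String) (w : String) (f : Int) :
    ∀ (m : Nat) (row : List Int) (t : Nat),
      ((List.range m).foldl (fun row k => if w == V.getD k "" then row.set k f else row) row)[t]?
        = if t < m ∧ (w == V.getD t "") then row[t]?.map (fun _ => f) else row[t]? := by
  intro m
  induction m with
  | zero => intro row t; simp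
  | succ m ih =>
    intro row t
    rw [List.range_succ, List.foldl_append]
    simp only [List.foldl_cons, List.foldl_nil]
    by_cases ht : t = m
    · subst ht
      by_cases hw : (w == V.getD t "")
      · rw [if_pos hw, List.getElem?_set_self', ih, if_neg (by simp)]
        rw [if_pos ⟨Nat.lt_succ_self t, hw⟩]
        cases row[t]? <;> rfl
      · rw [if_neg hw, ih, if_neg (by simp), if_neg (fun h => hw h.2)]
    · by_cases hw : (w == V.getD m "")
      · rw [if_pos hw, List.getElem?_set_ne (by omega), ih]
        by_cases hc : t < m ∧ (w == V.getD t "") = true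
        · rw [if_pos hc, if_pos ⟨by omega, hc.2⟩]
        · rw [if_neg hc, if_neg (fun h => hc ⟨Nat.lt_of_le_of_ne (Nat.lt_succ_iff.mp h.1) ht, h.2⟩)]
      · rw [if_neg hw, ih]
        by_cases hc : t < m ∧ (w == V.getD t "") = true
        · rw [if_pos hc, if_pos ⟨by omega, hc.2⟩]
        · rw [if_neg hc, if_neg (fun h => hc ⟨Nat.lt_of_le_of_ne (Nat.lt_succ_iff.mp h.1) ht, h.2⟩)]

-- the same k-scan applied to a row of the form V.map g
theorem pv_kfold_map (V : List String) (w : String) (f : Int) (g : String → Int) :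
    (List.range V.length).foldl (fun row k => if w == V.getD k "" then row.set k f else row) (V.map g)
      = V.map (fun v => if w = v then f else g v) := by
  apply List.ext_getElem?
  intro t
  rw [pv_kfold_getElem]
  by_cases ht : t < V.length
  · have hD : V.getD t "" = V[t] := List.getD_eq_getElem V "" ht
    rw [hD]
    simp only [List.getElem?_map]
    rw [List.getElem?_eq_getElem ht]
    simp only [Option.map_some]
    by_cases hw : w = V[t]
    · rw [if_pos ⟨ht, by simp [hw]⟩, if_pos hw]
    · rw [if_neg (fun h => hw (by simpa using h.2)), if_neg hw]
  · simp only [List.getElem?_map]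
    rw [List.getElem?_eq_none (by omega)]
    simp

-- one document: the j-loop over its words equals lookups in the dict built from zip(words, freqs),
-- provided every word that occurs in the vocabulary has a frequency (the Pre_ condition for this row)
theorem pv_row_eq (V : List String) (wi : List String) (fi : List Int)
    (hP : ∀ j < wi.length, wi.getD j "" ∈ V → j < fi.length) :
    ∀ L ≤ wi.length,
      (List.range L).foldl (fun row j =>
          (List.range V.length).foldl (fun row k =>
            if wi.getD j "" == V.getD k "" then row.set k (fi.getD j 0) else row) row)
        (V.map (fun _ => (0 : Int)))
      = V.map (fun v => (((wi.zip fi).take L).foldl (fun d p => d.insert p.1 p.2)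
          (PySem.Dict.empty : PySem.Dict String Int)).getD v 0) := by
  intro L
  induction L with
  | zero =>
    intro _
    simp [PySem.Dict.getD_empty]
  | succ L ih =>
    intro hL
    have hLw : L < wi.length := by omega
    rw [List.range_succ, List.foldl_append]
    simp only [List.foldl_cons, List.foldl_nil]
    rw [ih (by omega), pv_kfold_map]
    by_cases hf : L < fi.length
    · have hz : L < (wi.zip fi).length := by simp [List.length_zip]; omega
      rw [List.take_succ_eq_append_getElem hz, List.foldl_append]
      simp only [List.foldl_cons, List.foldl_nil, List.getElem_zip]
      apply List.map_congr_left
      intro v _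
      rw [PySem.Dict.getD_insert]
      rw [List.getD_eq_getElem wi "" hLw, List.getD_eq_getElem fi 0 hf]
      by_cases hvw : v = wi[L]
      · simp [hvw]
      · rw [if_neg (fun hh => hvw hh.symm), if_neg hvw]
    · have hz : (wi.zip fi).length ≤ L := by simp [List.length_zip]; omega
      rw [List.take_of_length_le hz, List.take_of_length_le (le_trans hz (Nat.le_succ L))]
      apply List.map_congr_left
      intro v hv
      have hnot : wi.getD L "" ∉ V := fun hmem => hf (hP L hLw hmem)
      have : wi.getD L "" ≠ v := fun h => hnot (h ▸ hv)
      rw [if_neg this]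

-- the outer i-loop writes each row at most once; entry-wise description
theorem pv_outer_getElem (F : Nat → List Int → List Int) :
    ∀ (m : Nat) (c : List (List Int)) (t : Nat),
      ((List.range m).foldl (fun c i => c.set i (F i (c.getD i []))) c)[t]?
        = if t < m then (getElem? c t).map (F t) else getElem? c t := by
  intro m
  induction m with
  | zero => intro c t; simp
  | succ m ih =>
    intro c t
    rw [List.range_succ, List.foldl_append]
    simp only [List.foldl_cons, List.foldl_nil]
    have hm : ((List.range m).foldl (fun c i => c.set i (F i (c.getD i []))) c).getD m []
        = c.getD m [] := by
      rw [List.getD_eq_getElem?_getD, List.getD_eq_getElem?_getD, ih]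
      rw [if_neg (Nat.lt_irrefl m)]
    rw [hm]
    by_cases ht : t = m
    · subst ht
      rw [List.getElem?_set_self', ih, if_neg (Nat.lt_irrefl t), if_pos (Nat.lt_succ_self t)]
      rw [List.getD_eq_getElem?_getD]
      cases getElem? c t <;> rfl
    · rw [List.getElem?_set_ne (by omega), ih]
      by_cases hlt : t < m
      · rw [if_pos hlt, if_pos (by omega)]
      · rw [if_neg hlt, if_neg (by omega)]

-- reading an entry of a row-building map over range
theorem pv_getElem?_map_range {α : Type} (n t : Nat) (f : Nat → α) (h : t < n) :
    getElem? ((List.range n).map f) t = some (f t) := by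
  simp [h]

theorem pv_getElem?_map_range_none {α : Type} (n t : Nat) (f : Nat → α) (h : ¬ t < n) :
    getElem? ((List.range n).map f) t = none := by
  apply List.getElem?_eq_none
  simpa using h

-- ===== VERDICT (by name: the statement is the Claim_ definition above) =====
theorem creating_dataset_spec : Claim_equal_creating_dataset := by
  intro vocab output_labels word_array freq_array _hDom hPre
  unfold Spec_creating_dataset creating_dataset creating_dataset_alt
  simp only []
  -- step 1: bring A's triple fold into row-local form
  have hbodyk : ∀ (i j : Nat) (c : List (List Int)),
      (List.range vocab.length).foldl (fun c k =>
        if (word_array.getD i []).getD j "" == vocab.getD k "" then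
          c.set i ((c.getD i []).set k ((freq_array.getD i []).getD j 0))
        else c) c
      = c.set i ((List.range vocab.length).foldl (fun row k =>
          if (word_array.getD i []).getD j "" == vocab.getD k "" then
            row.set k ((freq_array.getD i []).getD j 0) else row) (c.getD i [])) := by
    intro i j c
    rw [← pv_foldl_set_local (List.range vocab.length)
      (fun row k => if (word_array.getD i []).getD j "" == vocab.getD k "" then
        row.set k ((freq_array.getD i []).getD j 0) else row) i c]
    apply PySem.List.foldl_congr_mem
    intro c' k _
    by_cases h : ((word_array.getD i []).getD j "" == vocab.getD k "")
    · rw [if_pos h, if_pos h]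
    · rw [if_neg h, if_neg h]
      exact (pv_set_getD_self c' i).symm
  have hbodyj : ∀ (i : Nat) (c : List (List Int)),
      (List.range (word_array.getD i []).length).foldl (fun c j =>
        (List.range vocab.length).foldl (fun c k =>
          if (word_array.getD i []).getD j "" == vocab.getD k "" then
            c.set i ((c.getD i []).set k ((freq_array.getD i []).getD j 0))
          else c) c) c
      = c.set i ((List.range (word_array.getD i []).length).foldl (fun row j =>
          (List.range vocab.length).foldl (fun row k =>
            if (word_array.getD i []).getD j "" == vocab.getD k "" then
              row.set k ((freq_array.getD i []).getD j 0) else row) row) (c.getD i [])) := by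
    intro i c
    rw [← pv_foldl_set_local]
    apply PySem.List.foldl_congr_mem
    intro c' j _
    exact hbodyk i j c'
  -- the per-row transformer
  set F : Nat → List Int → List Int := fun i row =>
    (List.range (word_array.getD i []).length).foldl (fun row j =>
      (List.range vocab.length).foldl (fun row k =>
        if (word_array.getD i []).getD j "" == vocab.getD k "" then
          row.set k ((freq_array.getD i []).getD j 0) else row) row) row with hF
  have hA : (List.range word_array.length).foldl (fun c i =>
        (List.range (word_array.getD i []).length).foldl (fun c j =>
          (List.range vocab.length).foldl (fun c k =>
            if (word_array.getD i []).getD j "" == vocab.getD k "" then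
              c.set i ((c.getD i []).set k ((freq_array.getD i []).getD j 0))
            else c) c) c)
        ((List.range output_labels.length).map (fun _ => (List.range vocab.length).map (fun _ => (0 : Int))))
      = (List.range word_array.length).foldl (fun c i => c.set i (F i (c.getD i [])))
        ((List.range output_labels.length).map (fun _ => (List.range vocab.length).map (fun _ => (0 : Int)))) := by
    apply PySem.List.foldl_congr_mem
    intro c i _
    exact hbodyj i c
  rw [hA]
  -- step 2: compare entry by entry
  apply List.ext_getElem?
  intro t
  rw [pv_outer_getElem]
  set docs := (word_array.zip freq_array).map
    (fun wf => (wf.1.zip wf.2).foldl (fun d p => d.insert p.1 p.2) (PySem.Dict.empty : PySem.Dict String Int)) with hdocs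
  have hdl : docs.length = min word_array.length freq_array.length := by
    simp [hdocs, List.length_zip]
  have hzeros : ((List.range vocab.length).map (fun _ => (0 : Int))) = vocab.map (fun _ => (0 : Int)) := by
    simp [List.map_const']
  by_cases htn : t < output_labels.length
  · -- both sides are some row
    rw [pv_getElem?_map_range _ _ _ htn, pv_getElem?_map_range _ _ _ htn]
    simp only [Option.map_some]
    by_cases htm : t < word_array.length
    · rw [if_pos htm]
      congr 1
      by_cases htf : t < freq_array.length
      · -- the generic row: dict of zip(words, freqs)
        have htd : t < docs.length := by omega
        have hrow := pv_row_eq vocab (word_array.getD t []) (freq_array.getD t [])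
          (fun j hj hm => (hPre t htm j hj hm).2.2) (word_array.getD t []).length (le_refl _)
        have hzlen : ((word_array.getD t []).zip (freq_array.getD t [])).length
            ≤ (word_array.getD t []).length := by simp [List.length_zip]
        rw [List.take_of_length_le hzlen] at hrow
        rw [hF]; simp only []
        rw [hzeros, hrow]
        simp only [if_pos htd]
        have : docs.getD t PySem.Dict.empty
            = ((word_array.getD t []).zip (freq_array.getD t [])).foldl
                (fun d p => d.insert p.1 p.2) PySem.Dict.empty := by
          rw [hdocs, List.getD_eq_getElem _ _ (by simpa [hdocs] using htd)]
          rw [List.getElem_map, List.getElem_zip]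
          rw [List.getD_eq_getElem word_array [] htm, List.getD_eq_getElem freq_array [] htf]
        rw [this]
      · -- row beyond freq_array: Pre_ says it has no vocabulary words; both sides are zeros
        have hfi : freq_array.getD t [] = [] := by
          rw [List.getD_eq_getElem?_getD, List.getElem?_eq_none (by omega)]
          rfl
        have hrow := pv_row_eq vocab (word_array.getD t []) (freq_array.getD t [])
          (fun j hj hm => absurd (hPre t htm j hj hm).2.1 (by omega))
          (word_array.getD t []).length (le_refl _)
        have hz2 : (word_array.getD t []).zip (freq_array.getD t []) = ([] : List (String × Int)) := by
          rw [hfi, List.zip_nil_right]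
        rw [hz2] at hrow
        simp only [List.take_nil, List.foldl_nil] at hrow
        rw [hF]; simp only []
        rw [hzeros, hrow]
        simp only [if_neg (show ¬ t < docs.length by omega)]
        simp [PySem.Dict.getD_empty]
    · -- row never touched by A; B's docs run out too (docs.length ≤ word_array.length ≤ t)
      rw [if_neg htm]
      congr 1
      simp only [if_neg (show ¬ t < docs.length by omega)]
      rw [hzeros]
  · -- past the row count: both sides are none
    rw [pv_getElem?_map_range_none _ _ _ htn, pv_getElem?_map_range_none _ _ _ htn]
    simp
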